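-- pv_equiv track=rewrite | github.com/FidelioC/A3-COMP3010 | peer_miner_save.py | find_majority_hash
-- ===== SOURCE A (Python) =====
-- def find_majority_hash(stats_replies):
--     hash_counts = {}
--     # try:
--     for entry in stats_replies:
--         current_hash = entry['hash']
--         hash_counts[current_hash] = hash_counts.get(current_hash, 0) + 1
--     # Find the majority hash
--     majority_hash = max(hash_counts, key=hash_counts.get)
--     # Filter entries with the majority hash
--     entries_with_majority_hash = [entry for entry in stats_replies if entry['hash'] == majority_hash]
--     return entries_with_majority_hash
-- ===== SOURCE B (Python) =====
-- def find_majority_hash(stats_replies):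
--     groups = {}
--     for entry in stats_replies:
--         groups.setdefault(entry['hash'], []).append(entry)
--     majority_hash = max(groups, key=lambda h: len(groups[h]))
--     return groups[majority_hash]
-- ===== Notes on version B (the rewrite author's own statement) =====
-- stated objective: simpler
-- what changed: B groups entries by hash into a dict of lists in one pass and returns the majority group directly, replacing A's separate count pass plus refilter pass over the whole input.
import Mathlib
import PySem

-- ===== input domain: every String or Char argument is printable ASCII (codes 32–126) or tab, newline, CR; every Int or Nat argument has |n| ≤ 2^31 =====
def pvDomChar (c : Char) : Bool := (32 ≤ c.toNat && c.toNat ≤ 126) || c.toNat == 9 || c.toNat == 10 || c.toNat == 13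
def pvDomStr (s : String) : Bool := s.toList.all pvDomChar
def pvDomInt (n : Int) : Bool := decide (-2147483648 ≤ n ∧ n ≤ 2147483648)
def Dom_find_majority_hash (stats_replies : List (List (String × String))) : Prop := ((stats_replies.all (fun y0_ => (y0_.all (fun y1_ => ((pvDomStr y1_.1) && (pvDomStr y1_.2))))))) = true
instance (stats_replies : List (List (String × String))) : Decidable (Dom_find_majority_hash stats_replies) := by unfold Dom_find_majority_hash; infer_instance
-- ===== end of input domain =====

-- ===== PORT A =====
-- B groups entries per hash in one pass and returns the majority group directly,
-- instead of A's count-then-refilter two passes (objective: simpler/alternative; return value only).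
-- entry['hash'] : dict lookup (first match); default "" is only reached outside Pre_ (Python raises KeyError there)
def entryHash (e : List (String × String)) : String := (PySem.Dict.mk e).getD "hash" ""

def find_majority_hash (stats_replies : List (List (String × String))) : List (List (String × String)) :=
  let hash_counts : PySem.Dict String Int :=
    stats_replies.foldl (fun d entry => d.insert (entryHash entry) (d.getD (entryHash entry) 0 + 1)) PySem.Dict.empty
  match PySem.List.max? hash_counts.keys (fun k => hash_counts.getD k 0) with
  | none => []  -- Python raises ValueError here (empty stats_replies); excluded by Pre_
  | some majority_hash => stats_replies.filter (fun entry => entryHash entry == majority_hash)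

-- ===== PORT B =====
def find_majority_hash_alt (stats_replies : List (List (String × String))) : List (List (String × String)) :=
  let groups : PySem.Dict String (List (List (String × String))) :=
    stats_replies.foldl (fun d entry => d.modify (entryHash entry) [] (fun l => l ++ [entry])) PySem.Dict.empty
  match PySem.List.max? groups.keys (fun h => (groups.getD h []).length) with
  | none => []  -- Python raises ValueError here (empty stats_replies); excluded by Pre_
  | some majority_hash => groups.getD majority_hash []

-- ===== PRECONDITION & SPEC =====
-- Pre_ excludes exactly where the Python A raises: the empty list (ValueError from max)
-- and entries without a 'hash' key (KeyError).
def Pre_find_majority_hash (stats_replies : List (List (String × String))) : Prop :=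
  stats_replies ≠ [] ∧ ∀ e ∈ stats_replies, (PySem.Dict.mk e).contains "hash" = true
instance (stats_replies : List (List (String × String))) : Decidable (Pre_find_majority_hash stats_replies) := by
  unfold Pre_find_majority_hash; infer_instance

def pvWitness_find_majority_hash : (List (List (String × String))) :=
  [[("hash", "a"), ("id", "1")], [("hash", "b")], [("hash", "a")]]

def Spec_find_majority_hash (stats_replies : List (List (String × String))) (out : List (List (String × String))) : Prop := out = find_majority_hash_alt stats_replies
instance (stats_replies : List (List (String × String))) (out : List (List (String × String))) : Decidable (Spec_find_majority_hash stats_replies out) := by unfold Spec_find_majority_hash; infer_instance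

-- ===== CLAIM (what is proved, stated in full; the proofs are below) =====
def Claim_equal_find_majority_hash : Prop := ∀ (stats_replies : List (List (String × String))), Dom_find_majority_hash stats_replies → Pre_find_majority_hash stats_replies → Spec_find_majority_hash stats_replies (find_majority_hash stats_replies)

-- ===== LEMMAS AND PROOFS =====

-- max? is insensitive to replacing an Int-valued key by the Nat it casts from (accumulator-generalized)
theorem foldl_max_cast_congr {α : Type} (f : α → Int) (g : α → Nat)
    (l : List α) (acc : Option α)
    (hacc : ∀ m, acc = some m → f m = (g m : Int)) (h : ∀ a ∈ l, f a = (g a : Int)) :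
    l.foldl (fun acc x => match acc with
      | none => some x
      | some m => if f m < f x then some x else some m) acc
    = l.foldl (fun acc x => match acc with
      | none => some x
      | some m => if g m < g x then some x else some m) acc := by
  induction l generalizing acc with
  | nil => rfl
  | cons a t ih =>
    have ha : f a = (g a : Int) := h a (by simp)
    simp only [List.foldl_cons]
    cases acc with
    | none =>
      apply ih
      · intro m hm
        cases hm; exact ha
      · intro x hx; exact h x (List.mem_cons_of_mem _ hx)
    | some m =>
      have hm := hacc m rfl
      have hiff : f m < f a ↔ g m < g a := by rw [hm, ha]; exact Nat.cast_lt
      by_cases hlt : g m < g a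
      · simp only [if_pos hlt, if_pos (hiff.mpr hlt)]
        apply ih
        · intro m' hm'
          cases hm'; exact ha
        · intro x hx; exact h x (List.mem_cons_of_mem _ hx)
      · simp only [if_neg hlt, if_neg (fun hf => hlt (hiff.mp hf))]
        apply ih
        · intro m' hm'
          cases hm'; exact hm
        · intro x hx; exact h x (List.mem_cons_of_mem _ hx)

theorem max?_cast_congr {α : Type} (f : α → Int) (g : α → Nat) (l : List α)
    (h : ∀ a ∈ l, f a = (g a : Int)) :
    PySem.List.max? l f = PySem.List.max? l g := by
  unfold PySem.List.max?
  exact foldl_max_cast_congr f g l none (by intro m hm; cases hm) h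

theorem counts_getD (sr : List (List (String × String))) (c : String) :
    (sr.foldl (fun d entry => d.insert (entryHash entry) (d.getD (entryHash entry) 0 + 1))
      (PySem.Dict.empty : PySem.Dict String Int)).getD c 0
    = ((sr.filter (fun e => entryHash e == c)).length : Int) := by
  have h1 : sr.foldl (fun d entry => d.insert (entryHash entry) (d.getD (entryHash entry) 0 + 1))
      (PySem.Dict.empty : PySem.Dict String Int)
    = (sr.map entryHash).foldl (fun d x => d.insert x (d.getD x 0 + 1)) PySem.Dict.empty := by
    rw [List.foldl_map]
  rw [h1, PySem.Dict.getD_foldl_insert_add_one]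
  simp [List.count_eq_countP, List.countP_eq_length_filter, List.filter_map, Function.comp_def]

theorem groups_getD (sr : List (List (String × String))) (c : String) :
    (sr.foldl (fun d entry => d.modify (entryHash entry) [] (fun l => l ++ [entry]))
      (PySem.Dict.empty : PySem.Dict String (List (List (String × String))))).getD c []
    = sr.filter (fun e => entryHash e == c) := by
  have h1 : sr.foldl (fun d entry => d.modify (entryHash entry) [] (fun l => l ++ [entry]))
      (PySem.Dict.empty : PySem.Dict String (List (List (String × String))))
    = (sr.map (fun e => (entryHash e, e))).foldl (fun d p => d.modify p.1 [] (fun l => l ++ [p.2]))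
        PySem.Dict.empty := by
    rw [List.foldl_map]
  rw [h1, PySem.Dict.getD_foldl_modify_append]
  simp [List.filter_map, List.map_map, Function.comp_def]


theorem keys_eq (sr : List (List (String × String))) :
    (sr.foldl (fun d entry => d.insert (entryHash entry) (d.getD (entryHash entry) 0 + 1))
      (PySem.Dict.empty : PySem.Dict String Int)).keys
    = (sr.foldl (fun d entry => d.modify (entryHash entry) [] (fun l => l ++ [entry]))
      (PySem.Dict.empty : PySem.Dict String (List (List (String × String))))).keys := by
  rw [PySem.Dict.keys_foldl_insert_key sr entryHash,
      PySem.Dict.keys_foldl_modify_key sr entryHash]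
  rfl

-- ===== VERDICT (by name: the statement is the Claim_ definition above) =====
theorem find_majority_hash_spec : Claim_equal_find_majority_hash := by
  intro sr _ _
  unfold Spec_find_majority_hash find_majority_hash find_majority_hash_alt
  simp only
  rw [keys_eq sr]
  rw [max?_cast_congr
    (fun k => ((sr.foldl (fun d entry => d.insert (entryHash entry) (d.getD (entryHash entry) 0 + 1))
      (PySem.Dict.empty : PySem.Dict String Int)).getD k 0))
    (fun k => ((sr.foldl (fun d entry => d.modify (entryHash entry) [] (fun l => l ++ [entry]))
      (PySem.Dict.empty : PySem.Dict String (List (List (String × String))))).getD k []).length)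
    _ (fun k _ => by simp only [counts_getD, groups_getD])]
  cases hmax : PySem.List.max? _ (fun k =>
      ((sr.foldl (fun d entry => d.modify (entryHash entry) [] (fun l => l ++ [entry]))
        (PySem.Dict.empty : PySem.Dict String (List (List (String × String))))).getD k []).length) with
  | none => rfl
  | some mh => simp only [groups_getD]
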